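-- pv_equiv track=rewrite | github.com/jkoszucki/jkt_repo | scripts/analysis/chapter2/lib/ktypes_process.py | _path_fingerprint
-- ===== SOURCE A (Python) =====
-- def _path_fingerprint(monos: list[str], bonds: list[str], circular: bool = False) -> frozenset[tuple]:
--     """All bidirectional contiguous subpaths from a mono/bond sequence.
--
--     If circular=True and len(bonds) == len(monos), the sequence is treated as a
--     cyclic ring: subpaths that cross the end→start boundary are included by
--     extending the sequence to length 2n and taking all windows of length 1…n.
--     """
--     paths: set[tuple] = set()
--     n = len(monos)
--     if n == 0:
--         return frozenset()
--
--     if circular and len(bonds) == n: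
--         monos_ext = list(monos) + list(monos)
--         bonds_ext = list(bonds) + list(bonds)
--         for start in range(n):
--             for length in range(1, n + 1):
--                 end = start + length
--                 seg_m = tuple(monos_ext[start:end])
--                 seg_b = tuple(bonds_ext[start:end - 1])
--                 elems: list = []
--                 for i, m in enumerate(seg_m):
--                     elems.append(m)
--                     if i < len(seg_b):
--                         elems.append(seg_b[i])
--                 fwd = tuple(elems)
--                 paths.add(fwd)
--                 paths.add(fwd[::-1])
--     else:
--         for start in range(n):
--             for end in range(start + 1, n + 1):
--                 seg_m = tuple(monos[start:end])
--                 seg_b = tuple(bonds[start:end - 1])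
--                 elems: list = []
--                 for i, m in enumerate(seg_m):
--                     elems.append(m)
--                     if i < len(seg_b):
--                         elems.append(seg_b[i])
--                 fwd = tuple(elems)
--                 paths.add(fwd)
--                 paths.add(fwd[::-1])
--     return frozenset(paths)
-- ===== SOURCE B (Python) =====
-- def _path_fingerprint(monos: list[str], bonds: list[str], circular: bool = False) -> frozenset[tuple]:
--     """All bidirectional contiguous subpaths, built by growing each path
--     incrementally instead of rebuilding every window from slices."""
--     paths: set[tuple] = set()
--     n = len(monos)
--     if circular and len(bonds) == n:
--         ms = monos + monos
--         bs = bonds + bonds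
--         for start in range(n):
--             path = [ms[start]]
--             paths.add(tuple(path))
--             paths.add(tuple(path[::-1]))
--             for j in range(start + 1, start + n):
--                 path.append(bs[j - 1])
--                 path.append(ms[j])
--                 t = tuple(path)
--                 paths.add(t)
--                 paths.add(t[::-1])
--     else:
--         for start in range(n):
--             path = [monos[start]]
--             paths.add(tuple(path))
--             paths.add(tuple(path[::-1]))
--             for j in range(start + 1, n):
--                 if j - 1 < len(bonds):
--                     path.append(bonds[j - 1])
--                 path.append(monos[j])
--                 t = tuple(path)
--                 paths.add(t)
--                 paths.add(t[::-1])
--     return frozenset(paths)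
-- ===== Notes on version B (the rewrite author's own statement) =====
-- stated objective: alternative
-- what changed: Each fixed-start subpath is grown incrementally (append one bond and one mono per step, re-adding the tuple), instead of re-slicing the mono/bond lists and re-interleaving every window from scratch with an enumerate loop.
import Mathlib
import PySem

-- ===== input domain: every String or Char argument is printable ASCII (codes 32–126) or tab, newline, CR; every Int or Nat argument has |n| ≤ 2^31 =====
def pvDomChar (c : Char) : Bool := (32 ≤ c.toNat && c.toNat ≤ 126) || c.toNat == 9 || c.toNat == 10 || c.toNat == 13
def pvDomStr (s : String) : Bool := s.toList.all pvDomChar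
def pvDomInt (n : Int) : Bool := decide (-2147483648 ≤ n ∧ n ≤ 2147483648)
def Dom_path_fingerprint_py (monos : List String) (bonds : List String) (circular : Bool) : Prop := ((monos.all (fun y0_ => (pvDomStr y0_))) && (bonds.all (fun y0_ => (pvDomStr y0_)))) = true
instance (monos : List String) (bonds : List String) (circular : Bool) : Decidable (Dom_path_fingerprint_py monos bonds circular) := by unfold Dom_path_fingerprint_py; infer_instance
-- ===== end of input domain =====

-- B grows each subpath incrementally instead of rebuilding every window from slices; objective: alternative
-- (same asymptotic cost, no per-window re-slicing/re-interleaving).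


-- ===== PORT A =====
-- elems loop of A: for i, m in enumerate(seg_m): append m; if i < len(seg_b): append seg_b[i]
def pvElemsA (seg_m seg_b : List String) : List String :=
  (PySem.List.enumerate seg_m 0).foldl
    (fun elems im =>
      let elems' := elems ++ [im.2]
      if im.1 < (seg_b.length : Int) then elems' ++ [PySem.List.pyGetD seg_b im.1 ""] else elems')
    []

def path_fingerprint_py (monos : List String) (bonds : List String) (circular : Bool) : List (List String) :=
  let n : Int := monos.length
  if monos.length = 0 then [] else
  if circular && ((bonds.length : Int) == n) then
    let monos_ext := monos ++ monos
    let bonds_ext := bonds ++ bonds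
    (PySem.List.pyRange 0 n).foldl (fun paths start =>
      (PySem.List.pyRange 1 (n + 1)).foldl (fun paths len =>
        let e := start + len
        let seg_m := PySem.List.slice monos_ext (some start) (some e)
        let seg_b := PySem.List.slice bonds_ext (some start) (some (e - 1))
        let fwd := pvElemsA seg_m seg_b
        PySem.Set.add (PySem.Set.add paths fwd) fwd.reverse) paths)
      PySem.Set.empty
  else
    (PySem.List.pyRange 0 n).foldl (fun paths start =>
      (PySem.List.pyRange (start + 1) (n + 1)).foldl (fun paths e =>
        let seg_m := PySem.List.slice monos (some start) (some e)
        let seg_b := PySem.List.slice bonds (some start) (some (e - 1))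
        let fwd := pvElemsA seg_m seg_b
        PySem.Set.add (PySem.Set.add paths fwd) fwd.reverse) paths)
      PySem.Set.empty


-- ===== PORT B =====
def path_fingerprint_py_alt (monos : List String) (bonds : List String) (circular : Bool) : List (List String) :=
  let n : Int := monos.length
  if circular && ((bonds.length : Int) == n) then
    let ms := monos ++ monos
    let bs := bonds ++ bonds
    (PySem.List.pyRange 0 n).foldl (fun paths start =>
      let path0 := [PySem.List.pyGetD ms start ""]
      let paths := PySem.Set.add (PySem.Set.add paths path0) path0.reverse
      ((PySem.List.pyRange (start + 1) (start + n)).foldl (fun st j =>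
        let path := st.1 ++ [PySem.List.pyGetD bs (j - 1) "", PySem.List.pyGetD ms j ""]
        (path, PySem.Set.add (PySem.Set.add st.2 path) path.reverse)) (path0, paths)).2)
      PySem.Set.empty
  else
    (PySem.List.pyRange 0 n).foldl (fun paths start =>
      let path0 := [PySem.List.pyGetD monos start ""]
      let paths := PySem.Set.add (PySem.Set.add paths path0) path0.reverse
      ((PySem.List.pyRange (start + 1) n).foldl (fun st j =>
        let path := (if j - 1 < (bonds.length : Int) then st.1 ++ [PySem.List.pyGetD bonds (j - 1) ""] else st.1)
                    ++ [PySem.List.pyGetD monos j ""]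
        (path, PySem.Set.add (PySem.Set.add st.2 path) path.reverse)) (path0, paths)).2)
      PySem.Set.empty


-- ===== PRECONDITION & SPEC =====
def Spec_path_fingerprint_py (monos : List String) (bonds : List String) (circular : Bool) (out : List (List String)) : Prop := out = path_fingerprint_py_alt monos bonds circular
instance (monos : List String) (bonds : List String) (circular : Bool) (out : List (List String)) : Decidable (Spec_path_fingerprint_py monos bonds circular out) := by unfold Spec_path_fingerprint_py; infer_instance

-- ===== CLAIM (what is proved, stated in full; the proofs are below) =====
def Claim_equal_path_fingerprint_py : Prop := ∀ (monos : List String) (bonds : List String) (circular : Bool), Dom_path_fingerprint_py monos bonds circular → Spec_path_fingerprint_py monos bonds circular (path_fingerprint_py monos bonds circular)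

-- ===== LEMMAS AND PROOFS =====

def pvIl : List String → List String → List String
  | [], _ => []
  | m :: ms, [] => m :: pvIl ms []
  | m :: ms, b :: bs => m :: b :: pvIl ms bs

theorem pvIl_nil_bs (bs : List String) : pvIl [] bs = [] := by cases bs <;> rfl

theorem pvElemsA_aux (bs : List String) : ∀ (ms : List String) (k : Nat) (acc : List String),
    (PySem.List.enumerate ms (k : Int)).foldl
      (fun elems im =>
        let elems' := elems ++ [im.2]
        if im.1 < (bs.length : Int) then elems' ++ [PySem.List.pyGetD bs im.1 ""] else elems')
      acc = acc ++ pvIl ms (bs.drop k) := by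
  intro ms
  induction ms with
  | nil => intro k acc; simp [PySem.List.enumerate_nil, pvIl_nil_bs]
  | cons m ms ih =>
    intro k acc
    rw [PySem.List.enumerate_cons, List.foldl_cons]
    have hk1 : ((k : Int) + 1) = ((k + 1 : Nat) : Int) := by push_cast; ring
    by_cases h : k < bs.length
    · have hlt : (k : Int) < (bs.length : Int) := by exact_mod_cast h
      simp only [hlt, if_pos, hk1]
      rw [ih (k + 1)]
      have hdrop : bs.drop k = bs[k] :: bs.drop (k + 1) := List.drop_eq_getElem_cons h
      rw [PySem.List.pyGetD_natCast, hdrop]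
      have : bs.getD k "" = bs[k] := List.getD_eq_getElem bs "" h
      simp [pvIl, List.getElem?_eq_getElem h]
    · have hge : ¬ ((k : Int) < (bs.length : Int)) := by exact_mod_cast h
      simp only [hge, hk1, if_false]
      rw [ih (k + 1)]
      have h1 : bs.drop k = [] := List.drop_eq_nil_of_le (by omega)
      have h2 : bs.drop (k + 1) = [] := List.drop_eq_nil_of_le (by omega)
      rw [h1, h2]
      simp [pvIl]

theorem pvIl_snoc : ∀ (ms bs : List String) (m : String), bs.length ≤ ms.length →
    pvIl (ms ++ [m]) bs = pvIl ms bs ++ [m] := by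
  intro ms
  induction ms with
  | nil =>
    intro bs m h
    have : bs = [] := List.eq_nil_of_length_eq_zero (by simpa using h)
    subst this; simp [pvIl]
  | cons x ms ih =>
    intro bs m h
    cases bs with
    | nil => simp [pvIl, ih [] m (by simp)]
    | cons b bs => simp [pvIl, ih bs m (by simpa using h)]

theorem pvIl_snoc2 : ∀ (ms bs : List String) (m b : String), ms.length = bs.length + 1 →
    pvIl (ms ++ [m]) (bs ++ [b]) = pvIl ms bs ++ [b, m] := by
  intro ms
  induction ms with
  | nil => intro bs m b h; simp at h
  | cons x ms ih =>
    intro bs m b h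
    cases bs with
    | nil =>
      have : ms = [] := by simpa using h
      subst this; simp [pvIl]
    | cons c bs => simp [pvIl, ih bs m b (by simpa using h)]

def pvF (xs ys : List String) (s e : Nat) : List String :=
  pvIl ((xs.drop s).take (e - s)) ((ys.drop s).take (e - 1 - s))

theorem pvF_succ (xs ys : List String) (s e : Nat) (hse : s < e) (he : e < xs.length) :
    pvF xs ys s (e + 1) =
      (if e - 1 < ys.length then pvF xs ys s e ++ [ys.getD (e - 1) ""] else pvF xs ys s e)
        ++ [xs.getD e ""] := by
  have hms : (xs.drop s).take (e + 1 - s) = (xs.drop s).take (e - s) ++ [xs[e]] := by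
    have h1 : e + 1 - s = (e - s) + 1 := by omega
    rw [h1, List.take_add_one]
    have : (xs.drop s)[e - s]? = some xs[e] := by
      rw [List.getElem?_drop]
      have h2 : s + (e - s) = e := by omega
      rw [h2, List.getElem?_eq_getElem he]
    simp [this]
  have hlenms : ((xs.drop s).take (e - s)).length = e - s := by
    simp [List.length_take, List.length_drop]; omega
  have hxe : xs.getD e "" = xs[e] := List.getD_eq_getElem xs "" he
  have hE : e + 1 - 1 - s = e - s := by omega
  by_cases hb : e - 1 < ys.length
  · have hbs : (ys.drop s).take (e - s) = (ys.drop s).take (e - 1 - s) ++ [ys[e-1]] := by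
      have h1 : e - s = (e - 1 - s) + 1 := by omega
      rw [h1, List.take_add_one]
      have : (ys.drop s)[e - 1 - s]? = some ys[e-1] := by
        rw [List.getElem?_drop]
        have h2 : s + (e - 1 - s) = e - 1 := by omega
        rw [h2, List.getElem?_eq_getElem hb]
      simp [this]
    have hlenbs : ((ys.drop s).take (e - 1 - s)).length = e - 1 - s := by
      simp [List.length_take, List.length_drop]; omega
    rw [if_pos hb]
    unfold pvF
    rw [hE, hms, hbs, pvIl_snoc2 _ _ _ _ (by rw [hlenms, hlenbs]; omega)]
    have hye : ys.getD (e - 1) "" = ys[e-1] := List.getD_eq_getElem ys "" hb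
    simp [List.getElem?_eq_getElem he, List.getElem?_eq_getElem hb]
  · have hbs : (ys.drop s).take (e - s) = (ys.drop s).take (e - 1 - s) := by
      have hd : (ys.drop s).length ≤ e - 1 - s := by simp [List.length_drop]; omega
      rw [List.take_of_length_le (by omega), List.take_of_length_le hd]
    have hlenbs : ((ys.drop s).take (e - 1 - s)).length ≤ e - s := by
      simp [List.length_take, List.length_drop]; omega
    rw [if_neg hb]
    unfold pvF
    rw [hE, hms, hbs, pvIl_snoc _ _ _ (by rw [hlenms]; exact hlenbs)]
    simp [List.getElem?_eq_getElem he]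

theorem pvElemsA_eq_pvIl (ms bs : List String) : pvElemsA ms bs = pvIl ms bs := by
  have := pvElemsA_aux bs ms 0 []
  simpa [pvElemsA] using this

theorem pvVal (xs ys : List String) (s E : Nat) (h1 : s < E) :
    pvElemsA (PySem.List.slice xs (some (s : Int)) (some (E : Int)))
             (PySem.List.slice ys (some (s : Int)) (some ((E : Int) - 1))) = pvF xs ys s E := by
  have hE : (E : Int) - 1 = ((E - 1 : Nat) : Int) := by omega
  rw [hE, PySem.List.slice_natCast, PySem.List.slice_natCast, pvElemsA_eq_pvIl]
  rfl

theorem pvF_base (xs ys : List String) (s : Nat) (hs : s < xs.length) :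
    pvF xs ys s (s + 1) = [PySem.List.pyGetD xs (s : Int) ""] := by
  unfold pvF
  have h1 : s + 1 - s = 1 := by omega
  have h2 : s + 1 - 1 - s = 0 := by omega
  rw [h1, h2, List.take_zero]
  have : (xs.drop s).take 1 = [xs[s]] := by
    rw [List.take_one]
    simp [List.head?_drop, List.getElem?_eq_getElem hs]
  rw [this, PySem.List.pyGetD_natCast]
  simp [pvIl, List.getD, List.getElem?_eq_getElem hs]

-- inner-loop correspondence, non-circular branch
theorem pvInner_nc (monos bonds : List String) (s : Nat) (hs : s < monos.length) :
    ∀ (E : Nat), s + 1 ≤ E → E ≤ monos.length → ∀ paths : List (List String),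
    ((PySem.List.pyRange ((s : Int) + 1) (E : Int)).foldl
      (fun st j =>
        let path := (if j - 1 < (bonds.length : Int) then st.1 ++ [PySem.List.pyGetD bonds (j - 1) ""] else st.1)
                    ++ [PySem.List.pyGetD monos j ""]
        (path, PySem.Set.add (PySem.Set.add st.2 path) path.reverse))
      ([PySem.List.pyGetD monos (s : Int) ""],
       PySem.Set.add (PySem.Set.add paths [PySem.List.pyGetD monos (s : Int) ""])
         [PySem.List.pyGetD monos (s : Int) ""].reverse))
    = (pvF monos bonds s E,
       (PySem.List.pyRange ((s : Int) + 1) ((E : Int) + 1)).foldl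
        (fun paths e =>
          let seg_m := PySem.List.slice monos (some (s : Int)) (some e)
          let seg_b := PySem.List.slice bonds (some (s : Int)) (some (e - 1))
          let fwd := pvElemsA seg_m seg_b
          PySem.Set.add (PySem.Set.add paths fwd) fwd.reverse) paths) := by
  intro E hE1
  induction E, hE1 using Nat.le_induction with
  | base =>
    intro _ paths
    have hr1 : PySem.List.pyRange ((s : Int) + 1) ((s : Int) + 1) = [] := by
      simp
    have hr2 : PySem.List.pyRange ((s : Int) + 1) (((s + 1 : Nat) : Int) + 1) = [(s : Int) + 1] := by
      push_cast
      rw [PySem.List.pyRange_one_cons (by omega)]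
      simp
    push_cast
    rw [hr1]
    push_cast at hr2
    rw [hr2]
    simp only [List.foldl_nil, List.foldl_cons]
    have hv : pvElemsA (PySem.List.slice monos (some (s : Int)) (some ((s : Int) + 1)))
        (PySem.List.slice bonds (some (s : Int)) (some ((s : Int) + 1 - 1)))
        = pvF monos bonds s (s + 1) := by
      have := pvVal monos bonds s (s + 1) (by omega)
      push_cast at this
      exact this
    rw [hv, pvF_base monos bonds s hs]
  | succ E hE ih =>
    intro hE2 paths
    have hsE : (s : Int) + 1 ≤ (E : Int) := by exact_mod_cast hE
    have hrB : PySem.List.pyRange ((s : Int) + 1) (((E + 1 : Nat) : Int))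
        = PySem.List.pyRange ((s : Int) + 1) (E : Int) ++ [(E : Int)] := by
      push_cast
      exact PySem.List.pyRange_one_succ_right hsE
    have hrA : PySem.List.pyRange ((s : Int) + 1) (((E + 1 : Nat) : Int) + 1)
        = PySem.List.pyRange ((s : Int) + 1) ((E : Int) + 1) ++ [(E : Int) + 1] := by
      push_cast
      exact PySem.List.pyRange_one_succ_right (by omega)
    rw [hrB, hrA, List.foldl_append, List.foldl_append, ih (by omega) paths]
    simp only [List.foldl_cons, List.foldl_nil]
    -- value of the new step
    have hFnew : (if (E : Int) - 1 < (bonds.length : Int) then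
          pvF monos bonds s E ++ [PySem.List.pyGetD bonds ((E : Int) - 1) ""] else pvF monos bonds s E)
        ++ [PySem.List.pyGetD monos (E : Int) ""] = pvF monos bonds s (E + 1) := by
      have hcast : (E : Int) - 1 = ((E - 1 : Nat) : Int) := by omega
      have hcond : ((E : Int) - 1 < (bonds.length : Int)) ↔ (E - 1 < bonds.length) := by
        rw [hcast]; exact_mod_cast Iff.rfl
      rw [pvF_succ monos bonds s E (by omega) (by omega)]
      rw [hcast, PySem.List.pyGetD_natCast, PySem.List.pyGetD_natCast]
      by_cases hb : E - 1 < bonds.length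
      · rw [if_pos hb, if_pos (by exact_mod_cast hb)]
      · rw [if_neg hb, if_neg (by exact_mod_cast hb)]
    have hAnew : pvElemsA (PySem.List.slice monos (some (s : Int)) (some ((E : Int) + 1)))
        (PySem.List.slice bonds (some (s : Int)) (some ((E : Int) + 1 - 1)))
        = pvF monos bonds s (E + 1) := by
      have := pvVal monos bonds s (E + 1) (by omega)
      push_cast at this
      exact this
    simp only [hFnew, hAnew]

-- inner-loop correspondence, circular branch
theorem pvInner_c (monos bonds : List String) (s : Nat) (hs : s < monos.length) (hbl : bonds.length = monos.length) :
    ∀ (L : Nat), 1 ≤ L → L ≤ monos.length → ∀ paths : List (List String),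
    ((PySem.List.pyRange ((s : Int) + 1) ((s : Int) + (L : Int))).foldl
      (fun st j =>
        let path := st.1 ++ [PySem.List.pyGetD (bonds ++ bonds) (j - 1) "", PySem.List.pyGetD (monos ++ monos) j ""]
        (path, PySem.Set.add (PySem.Set.add st.2 path) path.reverse))
      ([PySem.List.pyGetD (monos ++ monos) (s : Int) ""],
       PySem.Set.add (PySem.Set.add paths [PySem.List.pyGetD (monos ++ monos) (s : Int) ""])
         [PySem.List.pyGetD (monos ++ monos) (s : Int) ""].reverse))
    = (pvF (monos ++ monos) (bonds ++ bonds) s (s + L),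
       (PySem.List.pyRange 1 ((L : Int) + 1)).foldl
        (fun paths len =>
          let e := (s : Int) + len
          let seg_m := PySem.List.slice (monos ++ monos) (some (s : Int)) (some e)
          let seg_b := PySem.List.slice (bonds ++ bonds) (some (s : Int)) (some (e - 1))
          let fwd := pvElemsA seg_m seg_b
          PySem.Set.add (PySem.Set.add paths fwd) fwd.reverse) paths) := by
  intro L hL1
  induction L, hL1 using Nat.le_induction with
  | base =>
    intro _ paths
    have hr1 : PySem.List.pyRange ((s : Int) + 1) ((s : Int) + (1 : Int)) = [] := by
      simp
    have hr2 : PySem.List.pyRange 1 ((1 : Nat) + 1) = [(1 : Int)] := by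
      rw [PySem.List.pyRange_one_cons (by omega)]
      simp
    push_cast
    rw [hr1]
    push_cast at hr2
    rw [hr2]
    simp only [List.foldl_nil, List.foldl_cons]
    have hv : pvElemsA (PySem.List.slice (monos ++ monos) (some (s : Int)) (some ((s : Int) + 1)))
        (PySem.List.slice (bonds ++ bonds) (some (s : Int)) (some ((s : Int) + 1 - 1)))
        = pvF (monos ++ monos) (bonds ++ bonds) s (s + 1) := by
      have := pvVal (monos ++ monos) (bonds ++ bonds) s (s + 1) (by omega)
      push_cast at this
      exact this
    rw [hv, pvF_base (monos ++ monos) (bonds ++ bonds) s (by simp; omega)]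
  | succ L hL ih =>
    intro hL2 paths
    have hrB : PySem.List.pyRange ((s : Int) + 1) ((s : Int) + ((L + 1 : Nat) : Int))
        = PySem.List.pyRange ((s : Int) + 1) ((s : Int) + (L : Int)) ++ [(s : Int) + (L : Int)] := by
      push_cast
      rw [show (s : Int) + ((L : Int) + 1) = ((s : Int) + (L : Int)) + 1 by ring]
      exact PySem.List.pyRange_one_succ_right (by omega)
    have hrA : PySem.List.pyRange 1 (((L + 1 : Nat) : Int) + 1)
        = PySem.List.pyRange 1 ((L : Int) + 1) ++ [(L : Int) + 1] := by
      push_cast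
      exact PySem.List.pyRange_one_succ_right (by omega)
    rw [hrB, hrA, List.foldl_append, List.foldl_append, ih (by omega) paths]
    simp only [List.foldl_cons, List.foldl_nil]
    have hlen2 : s + L < (monos ++ monos).length := by simp; omega
    have hblen : s + L - 1 < (bonds ++ bonds).length := by simp [hbl]; omega
    have hFnew : pvF (monos ++ monos) (bonds ++ bonds) s (s + L) ++
          [PySem.List.pyGetD (bonds ++ bonds) ((s : Int) + (L : Int) - 1) "",
           PySem.List.pyGetD (monos ++ monos) ((s : Int) + (L : Int)) ""]
        = pvF (monos ++ monos) (bonds ++ bonds) s (s + L + 1) := by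
      rw [pvF_succ (monos ++ monos) (bonds ++ bonds) s (s + L) (by omega) hlen2, if_pos hblen]
      have hc1 : (s : Int) + (L : Int) - 1 = ((s + L - 1 : Nat) : Int) := by omega
      have hc2 : (s : Int) + (L : Int) = ((s + L : Nat) : Int) := by push_cast; ring
      rw [hc1, hc2, PySem.List.pyGetD_natCast, PySem.List.pyGetD_natCast]
      simp
    have hAnew : pvElemsA
        (PySem.List.slice (monos ++ monos) (some (s : Int)) (some ((s : Int) + ((L : Int) + 1))))
        (PySem.List.slice (bonds ++ bonds) (some (s : Int)) (some ((s : Int) + ((L : Int) + 1) - 1)))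
        = pvF (monos ++ monos) (bonds ++ bonds) s (s + (L + 1)) := by
      have := pvVal (monos ++ monos) (bonds ++ bonds) s (s + (L + 1)) (by omega)
      push_cast at this
      convert this using 4
    rw [show s + (L + 1) = s + L + 1 by ring] at hAnew
    simp only [hFnew, hAnew]
    rfl

theorem pv_main (monos bonds : List String) (circular : Bool) :
    path_fingerprint_py monos bonds circular = path_fingerprint_py_alt monos bonds circular := by
  unfold path_fingerprint_py path_fingerprint_py_alt
  by_cases h0 : monos.length = 0
  · rw [if_pos h0]
    have he : monos = [] := List.eq_nil_of_length_eq_zero h0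
    subst he
    simp [PySem.List.pyRange_one, PySem.Set.empty]
  · rw [if_neg h0]
    by_cases hc : (circular && ((bonds.length : Int) == (monos.length : Int))) = true
    · rw [if_pos hc, if_pos hc]
      have hbl : bonds.length = monos.length := by
        have := (Bool.and_eq_true _ _).mp hc
        exact_mod_cast (beq_iff_eq.mp this.2)
      apply PySem.List.foldl_congr_mem
      intro acc x hx
      have hx' := (PySem.List.mem_pyRange_one).mp hx
      have hs : x.toNat < monos.length := by omega
      have hxx : x = ((x.toNat : Nat) : Int) := by omega
      rw [hxx]
      have := pvInner_c monos bonds x.toNat hs hbl monos.length (by omega) (by omega) acc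
      -- B's inner fold is the .2 of the pair; rewrite with the lemma
      have h2 := congrArg Prod.snd this
      simp only at h2
      rw [h2]
    · rw [if_neg hc, if_neg hc]
      apply PySem.List.foldl_congr_mem
      intro acc x hx
      have hx' := (PySem.List.mem_pyRange_one).mp hx
      have hs : x.toNat < monos.length := by omega
      have hxx : x = ((x.toNat : Nat) : Int) := by omega
      rw [hxx]
      have := pvInner_nc monos bonds x.toNat hs monos.length (by omega) (by omega) acc
      have h2 := congrArg Prod.snd this
      simp only at h2
      rw [h2]

-- ===== VERDICT (by name: the statement is the Claim_ definition above) =====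
theorem path_fingerprint_py_spec : Claim_equal_path_fingerprint_py := by
  intro monos bonds circular _
  unfold Spec_path_fingerprint_py
  exact pv_main monos bonds circular
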